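-- pv_equiv track=rewrite | github.com/cocanb-altort/Cocanb-bot-new | Translate/toc.py | trueLen
-- ===== SOURCE A (Python) =====
-- def trueLen(s):
--     #Checking if last characters of a word are numeric and counting all of it as one character
--
--     num = False
--     final = 0
--     for char in range(len(s)):
--         if s[char] >= '1' and s[char] <= '9':
--             if num == False:
--                 num = True
--         else:
--             if num == True:
--                 num = False
--                 final += 1
--             final += 1
--     if num == True:
--         return final + 1
--     else:
--         return final
-- ===== SOURCE B (Python) =====
-- def trueLen(s):
--     # Stage 1: project each char onto a two-symbol mask: a digit mark for 1-9, a space otherwise.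
--     mask = ''.join('D' if '1' <= c <= '9' else ' ' for c in s)
--     # Stage 2: each space is one non-digit char; each whitespace-split word is one digit run.
--     return mask.count(' ') + len(mask.split())
-- ===== Notes on version B (the rewrite author's own statement) =====
-- stated objective: simpler
-- what changed: Replaced A's per-index loop with an in-run boolean flag by two staged string passes: project the string onto a two-symbol mask (digit mark vs space), then return the count of spaces in the mask plus the number of its whitespace-split words (one word per digit run).
import Mathlib
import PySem

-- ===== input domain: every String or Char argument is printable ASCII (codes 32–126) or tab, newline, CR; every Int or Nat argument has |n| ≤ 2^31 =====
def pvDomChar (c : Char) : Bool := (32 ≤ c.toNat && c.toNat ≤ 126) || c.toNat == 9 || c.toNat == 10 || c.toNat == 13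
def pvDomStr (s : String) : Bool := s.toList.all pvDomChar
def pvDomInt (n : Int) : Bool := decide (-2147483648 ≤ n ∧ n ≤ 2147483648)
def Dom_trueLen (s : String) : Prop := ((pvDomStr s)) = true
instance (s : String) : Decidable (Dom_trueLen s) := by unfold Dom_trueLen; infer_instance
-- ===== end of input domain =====

-- B replaces A's index loop with a boolean flag by two staged string passes: project the
-- string onto a 'D'/' ' mask, then count spaces and whitespace-split words (objective: simpler).


-- ===== PORT A =====
-- A's loop over the indices of s, carried as a structural recursion over the chars
-- with the same state (num, final) and branches in the same order.
def trueLenLoop : List Char → Bool → Int → Int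
  | [], num, final => if num = true then final + 1 else final
  | c :: rest, num, final =>
      if '1' ≤ c ∧ c ≤ '9' then
        trueLenLoop rest true final
      else
        trueLenLoop rest false (if num = true then final + 1 + 1 else final + 1)

def trueLen (s : String) : Int := trueLenLoop s.toList false 0

-- ===== PORT B =====
-- ''.join of one single-char string per char is exactly this char-by-char map;
-- mask.count(' ') is PySem.Chars.count, mask.split() is PySem.Chars.split₀.
def trueLen_alt (s : String) : Int :=
  let mask : List Char := s.toList.map (fun c => if '1' ≤ c ∧ c ≤ '9' then 'D' else ' ')
  (PySem.Chars.count mask [' '] : Int) + ((PySem.Chars.split₀ mask).length : Int)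

-- ===== PRECONDITION & SPEC =====
def Spec_trueLen (s : String) (out : Int) : Prop := out = trueLen_alt s
instance (s : String) (out : Int) : Decidable (Spec_trueLen s out) := by unfold Spec_trueLen; infer_instance

-- ===== CLAIM (what is proved, stated in full; the proofs are below) =====
def Claim_equal_trueLen : Prop := ∀ (s : String), Dom_trueLen s → Spec_trueLen s (trueLen s)

-- ===== LEMMAS AND PROOFS =====

-- counting a single-char substring is counting that char
lemma count_go_single (c : Char) (l : List Char) : ∀ (fuel : Nat) (acc : Nat),
    l.length ≤ fuel → PySem.Chars.count.go [c] fuel l acc = acc + l.count c := by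
  induction l with
  | nil => intro fuel acc _; cases fuel <;> simp [PySem.Chars.count.go]
  | cons h t ih =>
    intro fuel acc hf
    cases fuel with
    | zero => simp at hf
    | succ f =>
      by_cases hc : c = h
      · subst hc
        simp [PySem.Chars.count.go, List.isPrefixOf, ih f (acc + 1) (by simpa using hf)]
        omega
      · have : ([c].isPrefixOf (h :: t)) = false := by
          simp [List.isPrefixOf]; exact hc
        simp [PySem.Chars.count.go, this, ih f acc (by simpa using hf), Ne.symm hc]

def pvMask (l : List Char) : List Char :=
  l.map (fun c => if '1' ≤ c ∧ c ≤ '9' then 'D' else ' ')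

-- joint invariant: A's state machine versus B's space count plus split words
lemma loop_eq_mask (l : List Char) :
    ∀ (num : Bool) (final : Int) (cur : List Char) (acc : List (List Char)),
    cur.isEmpty = !num →
    trueLenLoop l num final =
      final + ((pvMask l).count ' ' : Int)
        + ((PySem.Chars.split₀.go (pvMask l) cur acc).length : Int) - acc.length := by
  induction l with
  | nil =>
    intro num final cur acc hcur
    cases num with
    | false =>
      have hce : cur = [] := by simpa using hcur
      subst hce
      simp [trueLenLoop, pvMask, PySem.Chars.split₀.go]
    | true =>
      have hce : cur.isEmpty = false := by simpa using hcur
      simp [trueLenLoop, pvMask, PySem.Chars.split₀.go, hce]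
      ring
  | cons c rest ih =>
    intro num final cur acc hcur
    by_cases h : '1' ≤ c ∧ c ≤ '9'
    · have hD : PySem.Chars.isspace 'D' = false := by decide
      rw [show trueLenLoop (c :: rest) num final = trueLenLoop rest true final from by
            simp [trueLenLoop, h],
          ih true final ('D' :: cur) acc (by simp)]
      simp [pvMask, hD, PySem.Chars.split₀.go, h]
    · have hS : PySem.Chars.isspace ' ' = true := by decide
      cases num with
      | false =>
        have hce : cur = [] := by simpa using hcur
        subst hce
        rw [show trueLenLoop (c :: rest) false final = trueLenLoop rest false (final + 1) from by
              simp [trueLenLoop, h],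
            ih false (final + 1) [] acc (by simp)]
        simp [pvMask, hS, PySem.Chars.split₀.go, h]
        ring
      | true =>
        have hce : cur.isEmpty = false := by simpa using hcur
        rw [show trueLenLoop (c :: rest) true final = trueLenLoop rest false (final + 1 + 1) from by
              simp [trueLenLoop, h],
            ih false (final + 1 + 1) [] (cur.reverse :: acc) (by simp)]
        simp [pvMask, hS, hce, PySem.Chars.split₀.go, h]
        ring

-- ===== VERDICT (by name: the statement is the Claim_ definition above) =====
theorem trueLen_spec : Claim_equal_trueLen := by
  intro s _
  show trueLen s = trueLen_alt s
  have h := loop_eq_mask s.toList false 0 [] [] (by simp)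
  have hc : (pvMask s.toList).count ' ' = PySem.Chars.count (pvMask s.toList) [' '] := by
    rw [PySem.Chars.count]
    simp [count_go_single ' ' (pvMask s.toList) (pvMask s.toList).length 0 le_rfl]
  show trueLenLoop s.toList false 0 = _
  rw [h, hc]
  simp [trueLen_alt, PySem.Chars.split₀, pvMask]
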